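-- pv_equiv track=rewrite | github.com/x-rune-x/AoC_2024 | 03/main.py | find_enabled_code
-- ===== SOURCE A (Python) =====
-- def find_enabled_code(corrupted_code: str) -> str:
--     enabled = True
--     enabled_code = ""
--
--     for i, c in enumerate(corrupted_code):
--         if corrupted_code[i:i + 4] == "do()":
--             enabled = True
--         elif corrupted_code[i:i + 7] == "don't()":
--             enabled = False
--
--         if enabled:
--             enabled_code += c
--
--     return enabled_code
-- ===== SOURCE B (Python) =====
-- def find_enabled_code(corrupted_code: str) -> str:
--     # Jumping find-and-slice: collect the enabled stretches directly instead of
--     # scanning character by character.  A stretch starts at an enabling "do()"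
--     # (its 'd' included, as in the per-character scan) and ends just before the
--     # 'd' of the next "don't()".
--     parts = []
--     i = 0
--     while True:
--         j = corrupted_code.find("don't()", i)
--         if j == -1:
--             parts.append(corrupted_code[i:])
--             break
--         parts.append(corrupted_code[i:j])
--         k = corrupted_code.find("do()", j + 7)
--         if k == -1:
--             break
--         i = k
--     return "".join(parts)
-- ===== Notes on version B (the rewrite author's own statement) =====
-- stated objective: faster
-- what changed: Replaces the per-character scan (which slices and compares at every index and appends one char at a time) by a jumping find-and-slice loop: str.find locates the next don't()/do() marker and whole enabled stretches are sliced out and joined once.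
import Mathlib
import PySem

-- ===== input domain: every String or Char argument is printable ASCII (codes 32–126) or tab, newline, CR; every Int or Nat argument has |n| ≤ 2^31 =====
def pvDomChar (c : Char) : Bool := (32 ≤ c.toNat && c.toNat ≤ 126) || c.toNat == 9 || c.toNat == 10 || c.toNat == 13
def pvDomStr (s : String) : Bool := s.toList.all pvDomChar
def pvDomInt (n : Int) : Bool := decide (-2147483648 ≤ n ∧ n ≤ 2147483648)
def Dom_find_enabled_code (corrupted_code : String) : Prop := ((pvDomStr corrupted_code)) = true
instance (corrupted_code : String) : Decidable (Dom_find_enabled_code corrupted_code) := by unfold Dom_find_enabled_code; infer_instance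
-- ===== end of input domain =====

-- B replaces A's per-character scan by a find-and-slice jumping loop (objective: faster by a constant factor).

-- ===== PORT A =====
-- "do()" and "don't()" as char lists
def pvD4 : List Char := ['d', 'o', '(', ')']
def pvD7 : List Char := ['d', 'o', 'n', '\'', 't', '(', ')']

-- one iteration of A's for-loop body; ic = (i, c) from enumerate
def aStep (cs : List Char) (st : Bool × List Char) (ic : Int × Char) : Bool × List Char :=
  let enabled :=
    if PySem.List.slice cs (some ic.1) (some (ic.1 + 4)) = pvD4 then true
    else if PySem.List.slice cs (some ic.1) (some (ic.1 + 7)) = pvD7 then false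
    else st.1
  (enabled, if enabled then st.2 ++ [ic.2] else st.2)

def find_enabled_code (corrupted_code : String) : String :=
  let cs := corrupted_code.toList
  String.ofList ((PySem.List.enumerate cs 0).foldl (aStep cs) (true, [])).2

-- ===== PORT B =====
-- Source B's locals: j = s.find("don't()", i), k = s.find("do()", j + 7)
def bJ (cs : List Char) (i : Nat) : Int := PySem.Chars.findFrom cs pvD7 (i : Int) none
def bK (cs : List Char) (i : Nat) : Int :=
  PySem.Chars.findFrom cs pvD4 (((bJ cs i).toNat + 7 : Nat) : Int) none

-- Source B's while-loop: find the next "don't()", slice the enabled stretch off,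
-- then find the next "do()" after the marker and continue there.
-- (The index argument carries the bound i ≤ cs.length, used only for termination.)
def bLoop (cs : List Char) (i : Nat) (h : i ≤ cs.length) : List Char :=
  if hj : bJ cs i = -1 then
    PySem.List.slice cs (some (i : Int)) none
  else if hk : bK cs i = -1 then
    PySem.List.slice cs (some (i : Int)) (some (bJ cs i))
  else
    have hspec7 := PySem.Chars.findFrom_natCast_spec cs pvD7 i h hj
    have hj7 : (bJ cs i).toNat + 7 ≤ cs.length := by
      have hle : pvD7.length ≤ (cs.drop (bJ cs i).toNat).length := hspec7.2.1.length_le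
      rw [List.length_drop, show pvD7.length = 7 from rfl] at hle
      omega
    have hspec4 := PySem.Chars.findFrom_natCast_spec cs pvD4 ((bJ cs i).toNat + 7) hj7 hk
    have hkl : (bK cs i).toNat ≤ cs.length := by
      have hle : pvD4.length ≤ (cs.drop (bK cs i).toNat).length := hspec4.2.1.length_le
      rw [List.length_drop, show pvD4.length = 4 from rfl] at hle
      omega
    have hik : i < (bK cs i).toNat := by
      have h1 : (i : Int) ≤ bJ cs i := hspec7.1
      have h2 : (((bJ cs i).toNat + 7 : Nat) : Int) ≤ bK cs i := hspec4.1
      omega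
    PySem.List.slice cs (some (i : Int)) (some (bJ cs i)) ++ bLoop cs (bK cs i).toNat hkl
termination_by cs.length - i
decreasing_by exact Nat.sub_lt_sub_left (Nat.lt_of_lt_of_le hik hkl) hik

def find_enabled_code_alt (corrupted_code : String) : String :=
  String.ofList (bLoop corrupted_code.toList 0 (Nat.zero_le _))

-- ===== PRECONDITION & SPEC =====
def Spec_find_enabled_code (corrupted_code : String) (out : String) : Prop := out = find_enabled_code_alt corrupted_code
instance (corrupted_code : String) (out : String) : Decidable (Spec_find_enabled_code corrupted_code out) := by unfold Spec_find_enabled_code; infer_instance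

-- ===== CLAIM (what is proved, stated in full; the proofs are below) =====
def Claim_equal_find_enabled_code : Prop := ∀ (corrupted_code : String), Dom_find_enabled_code corrupted_code → Spec_find_enabled_code corrupted_code (find_enabled_code corrupted_code)

-- ===== LEMMAS AND PROOFS =====

-- A's loop from position p onwards with current flag e (proof-side reformulation)
def aGo (cs : List Char) (e : Bool) (p : Nat) : List Char :=
  if hp : p < cs.length then
    (if (if pvD4 <+: cs.drop p then true else if pvD7 <+: cs.drop p then false else e)
     then [cs[p]] else [])
      ++ aGo cs (if pvD4 <+: cs.drop p then true else if pvD7 <+: cs.drop p then false else e) (p + 1)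
  else []
termination_by cs.length - p

theorem aGo_past (cs : List Char) (e : Bool) (p : Nat) (hp : cs.length ≤ p) :
    aGo cs e p = [] := by
  rw [aGo]
  simp [Nat.not_lt.mpr hp]

-- the slice tests of A are prefix tests
theorem slice4_eq_iff (cs : List Char) (p : Nat) :
    (PySem.List.slice cs (some (p : Int)) (some ((p : Int) + 4)) = pvD4)
      ↔ pvD4 <+: cs.drop p := by
  rw [show ((p : Int) + 4) = (p : Int) + ((4 : Nat) : Int) by norm_cast,
    PySem.List.slice_natCast_add, List.prefix_iff_eq_take,
    show pvD4.length = 4 from rfl, eq_comm]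

theorem slice7_eq_iff (cs : List Char) (p : Nat) :
    (PySem.List.slice cs (some (p : Int)) (some ((p : Int) + 7)) = pvD7)
      ↔ pvD7 <+: cs.drop p := by
  rw [show ((p : Int) + 7) = (p : Int) + ((7 : Nat) : Int) by norm_cast,
    PySem.List.slice_natCast_add, List.prefix_iff_eq_take,
    show pvD7.length = 7 from rfl, eq_comm]

-- A's foldl over enumerate, started at position p, is acc ++ aGo cs e p
theorem foldl_aStep_eq_aGo (cs : List Char) :
    ∀ (l : List Char) (p : Nat) (e : Bool) (acc : List Char),
      cs.drop p = l →
      ((PySem.List.enumerate l (p : Int)).foldl (aStep cs) (e, acc)).2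
        = acc ++ aGo cs e p := by
  intro l
  induction l with
  | nil =>
    intro p e acc hd
    have hp : cs.length ≤ p := by
      have := congrArg List.length hd
      simp at this
      omega
    simp [PySem.List.enumerate_nil, aGo_past cs e p hp]
  | cons c l ih =>
    intro p e acc hd
    have hp : p < cs.length := by
      have := congrArg List.length hd
      simp at this
      omega
    have hdrop : cs.drop (p + 1) = l := by
      have h2 := congrArg List.tail hd
      rw [List.tail_drop] at h2
      simpa using h2
    have hc : cs[p] = c := by
      have : (cs.drop p)[0]'(by simp [hd]) = c := by simp [hd]
      simpa using this
    rw [PySem.List.enumerate_cons, List.foldl_cons,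
      show (p : Int) + 1 = ((p + 1 : Nat) : Int) by push_cast; ring]
    rw [aGo]
    simp only [hp, dif_pos]
    rw [show aStep cs (e, acc) ((p : Int), c)
        = (if pvD4 <+: cs.drop p then true
           else if pvD7 <+: cs.drop p then false else e,
           if (if pvD4 <+: cs.drop p then true
               else if pvD7 <+: cs.drop p then false else e)
           then acc ++ [c] else acc) from by
      simp only [aStep, slice4_eq_iff, slice7_eq_iff]]
    rw [ih (p + 1) _ _ hdrop]
    cases hE : (if pvD4 <+: cs.drop p then true
                else if pvD7 <+: cs.drop p then false else e) <;> simp [hc]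

-- enabled stretch: no "don't()" start in [i, j) keeps the flag true and copies chars
theorem aGo_true_stretch (cs : List Char) :
    ∀ (d i j : Nat), j - i = d → i ≤ j → j ≤ cs.length →
      (∀ q, i ≤ q → q < j → ¬ pvD7 <+: cs.drop q) →
      aGo cs true i = (cs.drop i).take (j - i) ++ aGo cs true j := by
  intro d
  induction d with
  | zero =>
    intro i j hd hij hjl hq
    have : i = j := by omega
    subst this
    simp
  | succ d ih =>
    intro i j hd hij hjl hq
    have hi : i < cs.length := by omega
    rw [aGo]
    simp only [hi, dif_pos]
    have h7 : ¬ pvD7 <+: cs.drop i := hq i le_rfl (by omega)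
    rw [show (if pvD4 <+: cs.drop i then true
              else if pvD7 <+: cs.drop i then false else true) = true from by
      split_ifs <;> simp_all]
    rw [ih (i + 1) j (by omega) (by omega) hjl (fun q h1 h2 => hq q (by omega) h2)]
    rw [List.drop_eq_getElem_cons hi, show j - i = (j - (i + 1)) + 1 by omega,
      List.take_succ_cons]
    simp

-- disabled stretch: no "do()" start in [i, j) keeps the flag false and copies nothing
theorem aGo_false_stretch (cs : List Char) :
    ∀ (d i j : Nat), j - i = d → i ≤ j →
      (∀ q, i ≤ q → q < j → ¬ pvD4 <+: cs.drop q) →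
      aGo cs false i = aGo cs false j := by
  intro d
  induction d with
  | zero =>
    intro i j hd hij hq
    have : i = j := by omega
    subst this
    rfl
  | succ d ih =>
    intro i j hd hij hq
    by_cases hi : i < cs.length
    · rw [aGo]
      simp only [hi, dif_pos]
      have h4 : ¬ pvD4 <+: cs.drop i := hq i le_rfl (by omega)
      rw [show (if pvD4 <+: cs.drop i then true
                else if pvD7 <+: cs.drop i then false else false) = false from by
        split_ifs <;> simp_all]
      rw [ih (i + 1) j (by omega) (by omega) (fun q h1 h2 => hq q (by omega) h2)]
      simp
    · rw [aGo_past cs false i (by omega), aGo_past cs false j (by omega)]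

-- at a "don't()" the flag switches off and the 'd' is not copied
theorem aGo_step_d7 (cs : List Char) (e : Bool) (j : Nat)
    (h7 : pvD7 <+: cs.drop j) :
    aGo cs e j = aGo cs false (j + 1) := by
  have hlen := h7.length_le
  rw [List.length_drop, show pvD7.length = 7 from rfl] at hlen
  have hj : j < cs.length := by omega
  have h4 : ¬ pvD4 <+: cs.drop j := by
    intro h4
    have e4 := h4.getElem (i := 2) (by decide)
    have e7 := h7.getElem (i := 2) (by decide)
    have : pvD4[2] = pvD7[2] := e4.trans e7.symm
    simp [pvD4, pvD7] at this
  rw [aGo]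
  simp [hj, h4, h7]

-- at a "do()" the flag is forced on, so the incoming flag is irrelevant
theorem aGo_step_d4 (cs : List Char) (k : Nat) (h4 : pvD4 <+: cs.drop k) :
    aGo cs false k = aGo cs true k := by
  by_cases hk : k < cs.length
  · conv_lhs => rw [aGo]
    conv_rhs => rw [aGo]
    simp only [hk, dif_pos, if_pos h4]
  · rw [aGo_past cs false k (by omega), aGo_past cs true k (by omega)]

-- no "do()" can start strictly inside a "don't()" marker
theorem no_d4_inside_d7 (cs : List Char) (j : Nat) (h7 : pvD7 <+: cs.drop j) :
    ∀ t, 1 ≤ t → t < 7 → ¬ pvD4 <+: cs.drop (j + t) := by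
  intro t h1 h7t h4
  have hlen7 := h7.length_le
  rw [List.length_drop, show pvD7.length = 7 from rfl] at hlen7
  have hlen4 := h4.length_le
  rw [List.length_drop, show pvD4.length = 4 from rfl] at hlen4
  have hd : cs[j + t]'(by omega) = 'd' := by
    have h0 := h4.getElem (i := 0) (by decide)
    rw [List.getElem_drop] at h0
    simpa [pvD4] using h0.symm
  have hjt : cs[j + t]'(by omega) = pvD7[t]'(by simp [pvD7]; omega) := by
    have ht := h7.getElem (i := t) (by simp [pvD7]; omega)
    rw [List.getElem_drop] at ht
    exact ht.symm
  rw [hd] at hjt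
  interval_cases t <;> simp [pvD7] at hjt

-- no marker starts at or after i when findFrom says -1
theorem no_prefix_of_findFrom_neg (cs sub : List Char) (i : Nat) (hi : i ≤ cs.length)
    (hn : PySem.Chars.findFrom cs sub (i : Int) none = -1) :
    ∀ q, i ≤ q → ¬ sub <+: cs.drop q := by
  intro q hq hpre
  have hinf : sub <:+: cs.drop i := by
    have hdd : cs.drop q = (cs.drop i).drop (q - i) := by
      rw [List.drop_drop]
      congr 1
      omega
    rw [hdd] at hpre
    exact hpre.isInfix.trans (List.drop_suffix _ _).isInfix
  exact ((PySem.Chars.findFrom_natCast_eq_neg_one_iff cs sub i hi).mp hn) hinf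

-- the core equivalence: A's loop in the enabled state equals B's loop
theorem aGo_eq_bLoop (cs : List Char) :
    ∀ (m i : Nat) (h : i ≤ cs.length), cs.length - i ≤ m →
      aGo cs true i = bLoop cs i h := by
  intro m
  induction m with
  | zero =>
    intro i h hm
    have hieq : i = cs.length := by omega
    subst hieq
    have hj : bJ cs cs.length = -1 := by
      by_contra hj
      have hspec7 := PySem.Chars.findFrom_natCast_spec cs pvD7 cs.length le_rfl hj
      have hlen7 : pvD7.length ≤ (cs.drop (bJ cs cs.length).toNat).length := hspec7.2.1.length_le
      rw [List.length_drop, show pvD7.length = 7 from rfl] at hlen7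
      have hij : ((cs.length : Nat) : Int) ≤ bJ cs cs.length := hspec7.1
      omega
    rw [bLoop, dif_pos hj, PySem.List.slice_from_natCast, List.drop_length,
      aGo_past cs true cs.length le_rfl]
  | succ m ih =>
    intro i h hm
    by_cases hj : bJ cs i = -1
    · rw [bLoop, dif_pos hj, PySem.List.slice_from_natCast]
      have hq := no_prefix_of_findFrom_neg cs pvD7 i h hj
      rw [aGo_true_stretch cs (cs.length - i) i cs.length rfl h le_rfl
        (fun q h1 _ => hq q h1)]
      rw [aGo_past cs true cs.length le_rfl, List.append_nil,
        show cs.length - i = (cs.drop i).length by simp, List.take_length]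
    · have hspec7 := PySem.Chars.findFrom_natCast_spec cs pvD7 i h hj
      have hij : (i : Int) ≤ bJ cs i := hspec7.1
      have hpre7 : pvD7 <+: cs.drop (bJ cs i).toNat := hspec7.2.1
      have hmin7 : ∀ q, i ≤ q → q < (bJ cs i).toNat → ¬ pvD7 <+: cs.drop q := hspec7.2.2
      have hlen7 : pvD7.length ≤ (cs.drop (bJ cs i).toNat).length := hpre7.length_le
      rw [List.length_drop, show pvD7.length = 7 from rfl] at hlen7
      set jn := (bJ cs i).toNat with hjn
      have hjval : bJ cs i = (jn : Int) := by omega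
      rw [aGo_true_stretch cs (jn - i) i jn rfl (by omega) (by omega) hmin7,
        aGo_step_d7 cs true jn hpre7]
      by_cases hk : bK cs i = -1
      · rw [bLoop, dif_neg hj, dif_pos hk]
        have hq4far := no_prefix_of_findFrom_neg cs pvD4 (jn + 7) (by omega) hk
        have hnod4 : ∀ q, jn + 1 ≤ q → q < cs.length → ¬ pvD4 <+: cs.drop q := by
          intro q h1 _ hpre
          by_cases hq7 : q < jn + 7
          · exact no_d4_inside_d7 cs jn hpre7 (q - jn) (by omega) (by omega)
              (by rw [show jn + (q - jn) = q by omega]; exact hpre)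
          · exact hq4far q (by omega) hpre
        rw [aGo_false_stretch cs (cs.length - (jn + 1)) (jn + 1) cs.length rfl (by omega)
          (fun q h1 h2 => hnod4 q h1 h2)]
        rw [aGo_past cs false cs.length le_rfl, List.append_nil, hjval,
          PySem.List.slice_natCast]
      · have hspec4 := PySem.Chars.findFrom_natCast_spec cs pvD4 (jn + 7)
          (by omega) hk
        have hjk : ((jn + 7 : Nat) : Int) ≤ bK cs i := hspec4.1
        have hpre4 : pvD4 <+: cs.drop (bK cs i).toNat := hspec4.2.1
        have hmin4 : ∀ q, jn + 7 ≤ q → q < (bK cs i).toNat → ¬ pvD4 <+: cs.drop q := hspec4.2.2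
        have hlen4 : pvD4.length ≤ (cs.drop (bK cs i).toNat).length := hpre4.length_le
        rw [List.length_drop, show pvD4.length = 4 from rfl] at hlen4
        set kn := (bK cs i).toNat with hkn
        have hnod4 : ∀ q, jn + 1 ≤ q → q < kn → ¬ pvD4 <+: cs.drop q := by
          intro q h1 h2 hpre
          by_cases hq7 : q < jn + 7
          · exact no_d4_inside_d7 cs jn hpre7 (q - jn) (by omega) (by omega)
              (by rw [show jn + (q - jn) = q by omega]; exact hpre)
          · exact hmin4 q (by omega) h2 hpre
        rw [aGo_false_stretch cs (kn - (jn + 1)) (jn + 1) kn rfl (by omega) hnod4,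
          aGo_step_d4 cs kn hpre4,
          ih kn (by omega) (by omega)]
        conv_rhs => rw [bLoop]
        rw [dif_neg hj, dif_neg hk]
        have h1 : PySem.List.slice cs (some (i : Int)) (some (bJ cs i))
            = List.take (jn - i) (List.drop i cs) := by
          rw [hjval, PySem.List.slice_natCast]
        exact congrArg₂ (· ++ ·) h1.symm rfl

-- ===== VERDICT (by name: the statement is the Claim_ definition above) =====
theorem find_enabled_code_spec : Claim_equal_find_enabled_code := by
  intro s _
  unfold Spec_find_enabled_code find_enabled_code find_enabled_code_alt
  have h0 : ((PySem.List.enumerate s.toList ((0 : Nat) : Int)).foldl (aStep s.toList) (true, [])).2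
      = [] ++ aGo s.toList true 0 := foldl_aStep_eq_aGo s.toList s.toList 0 true [] (by simp)
  simp only [Nat.cast_zero] at h0
  have h1 : ((PySem.List.enumerate s.toList 0).foldl (aStep s.toList) (true, [])).2
      = bLoop s.toList 0 (Nat.zero_le _) := by
    rw [h0, List.nil_append]
    exact aGo_eq_bLoop s.toList s.toList.length 0 (Nat.zero_le _) (by omega)
  exact congrArg String.ofList h1
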